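-- pv_equiv track=rewrite | github.com/sunilsoni/interview-notes-python | com/interview/2025/july/amazon/test5/test3.py | find_min_rooks
-- ===== SOURCE A (Python) =====
-- from collections import defaultdict
--
-- class UnionFind:
--     """Simple Union-Find (Disjoint Set) with path compression."""
--
--     def __init__(self, size):
--         # Initialize each element as its own parent (each element starts in its own set)
--         self.parent = list(range(size))  # [0,1,2,3,...,size-1]
--
--     def find(self, x):
--         # Find the root representative of element x
--         # Uses path compression: makes all nodes in path point directly to root
--         if self.parent[x] != x:  # If x is not its own parent
--             self.parent[x] = self.find(self.parent[x])  # Recursively find root and compress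
--         return self.parent[x]
--
--     def union(self, a, b):
--         # Merge the sets containing elements a and b
--         rootA = self.find(a)  # Find root of a's set
--         rootB = self.find(b)  # Find root of b's set
--         if rootA != rootB:  # If they're not already in same set
--             self.parent[rootB] = rootA  # Make rootA the parent of rootB
--
-- def find_min_rooks(board):
--     # Step 1: Find all rook positions
--     positions = []
--     for i, row in enumerate(board):
--         for j, cell in enumerate(row):
--             if cell == 1:  # If there's a rook
--                 positions.append((i, j))  # Store its coordinates
--     n = len(positions)  # Total number of rooks
--     if n == 0:
--         return 0  # Edge case: no rooks on board
--
--     # Step 2: Group rooks by their rows and columns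
--     rows = defaultdict(list)  # Dictionary: row_number → list of rook indices
--     cols = defaultdict(list)  # Dictionary: col_number → list of rook indices
--     for idx, (r, c) in enumerate(positions):
--         rows[r].append(idx)  # Add rook index to its row group
--         cols[c].append(idx)  # Add rook index to its column group
--
--     # Step 3: Create UnionFind structure
--     uf = UnionFind(n)  # Initialize with n rooks
--
--     # Step 4: Connect rooks in same row
--     for rook_list in rows.values():
--         first = rook_list[0]  # Take first rook in row
--         for other in rook_list[1:]:  # Connect it to all others in same row
--             uf.union(first, other)
--
--     # Step 5: Connect rooks in same column
--     for rook_list in cols.values():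
--         first = rook_list[0]  # Take first rook in column
--         for other in rook_list[1:]:  # Connect it to all others in same column
--             uf.union(first, other)
--
--     # Step 6: Count unique components
--     unique_roots = {uf.find(i) for i in range(n)}  # Set of all root representatives
--     return len(unique_roots)  # Number of connected components
-- ===== SOURCE B (Python) =====
-- def find_min_rooks(board):
--     positions = []
--     for i, row in enumerate(board):
--         for j, cell in enumerate(row):
--             if cell == 1:
--                 positions.append((i, j))
--     rows = {}
--     cols = {}
--     for idx, (r, c) in enumerate(positions):
--         rows.setdefault(r, []).append(idx)
--         cols.setdefault(c, []).append(idx)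
--     # label propagation: each rook starts in its own component; every row/col
--     # group is collapsed in one pass by relabelling all labels occurring in it
--     labels = list(range(len(positions)))
--     for group in list(rows.values()) + list(cols.values()):
--         target = labels[group[0]]
--         members = {labels[g] for g in group}
--         labels = [target if l in members else l for l in labels]
--     return len(set(labels))
-- ===== Notes on version B (the rewrite author's own statement) =====
-- stated objective: alternative
-- what changed: Union-find (per-pair unions with find/path compression, then counting distinct roots) is replaced by a flat label array: each row/column group is collapsed in one pass by relabelling every label occurring in the group to the group head's label, and the answer is the number of distinct labels; the n==0 special case disappears.
import Mathlib
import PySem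

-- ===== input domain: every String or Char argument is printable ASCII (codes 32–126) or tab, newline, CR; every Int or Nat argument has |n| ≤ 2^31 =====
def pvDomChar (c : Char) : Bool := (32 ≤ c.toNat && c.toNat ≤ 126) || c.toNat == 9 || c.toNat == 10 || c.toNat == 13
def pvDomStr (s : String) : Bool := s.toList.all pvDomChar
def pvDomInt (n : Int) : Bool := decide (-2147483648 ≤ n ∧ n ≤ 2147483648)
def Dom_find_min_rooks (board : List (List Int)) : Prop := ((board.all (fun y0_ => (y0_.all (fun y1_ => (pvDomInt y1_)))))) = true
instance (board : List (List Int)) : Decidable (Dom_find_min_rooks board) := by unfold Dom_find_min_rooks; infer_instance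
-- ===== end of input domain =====

-- B replaces A's union-find (per-pair unions, find with path compression) by a flat
-- label list collapsed in one pass per row/column group; objective: alternative, not faster.

-- ===== PORT A =====
-- Shared by both ports: both Pythons collect rook positions and group rook indices by
-- row and by column with the very same loops (A via defaultdict-append, B via
-- setdefault-append — identical semantics, ported as Dict.modify).
def pvPositions (board : List (List Int)) : List (Int × Int) :=
  board.zipIdx.foldl (fun acc rowp =>
    rowp.1.zipIdx.foldl (fun acc cellp =>
      if cellp.1 = 1 then acc ++ [((rowp.2 : Int), (cellp.2 : Int))] else acc) acc) []

def pvGroups (pos : List (Int × Int)) :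
    PySem.Dict Int (List Nat) × PySem.Dict Int (List Nat) :=
  pos.zipIdx.foldl
    (fun dd p => (dd.1.modify p.1.1 [] (· ++ [p.2]), dd.2.modify p.1.2 [] (· ++ [p.2])))
    (PySem.Dict.empty, PySem.Dict.empty)

-- UnionFind.find with path compression; `fuel` only makes Python's recursion structural
-- (never exhausted on the states A reaches, proved below); parent[x] is getD x 0 —
-- every access A performs is in range.
def pvFindUF : Nat → List Nat → Nat → List Nat × Nat
  | 0, p, x => (p, x)
  | fuel+1, p, x =>
    let px := p.getD x 0
    if px = x then (p, x)
    else
      let pr := pvFindUF fuel p px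
      (pr.1.set x pr.2, pr.2)

def pvUnionUF (p : List Nat) (a b : Nat) : List Nat :=
  let fa := pvFindUF p.length p a
  let fb := pvFindUF fa.1.length fa.1 b
  if fa.2 ≠ fb.2 then fb.1.set fb.2 fa.2 else fb.1

def find_min_rooks (board : List (List Int)) : Int :=
  let positions := pvPositions board
  let n := positions.length
  if n = 0 then 0
  else
    let rc := pvGroups positions
    let uf0 := List.range n
    let uf1 := rc.1.values.foldl
      (fun p g => (g.drop 1).foldl (fun p other => pvUnionUF p (g.headD 0) other) p) uf0
    let uf2 := rc.2.values.foldl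
      (fun p g => (g.drop 1).foldl (fun p other => pvUnionUF p (g.headD 0) other) p) uf1
    let fin := (List.range n).foldl
      (fun ps i => let fr := pvFindUF ps.1.length ps.1 i; (fr.1, PySem.Set.add ps.2 fr.2))
      (uf2, PySem.Set.empty)
    (fin.2.length : Int)

-- ===== PORT B =====
def find_min_rooks_alt (board : List (List Int)) : Int :=
  let positions := pvPositions board
  let rc := pvGroups positions
  let labels0 := List.range positions.length
  let labels := (rc.1.values ++ rc.2.values).foldl
    (fun labels g =>
      let target := labels.getD (g.headD 0) 0
      let members := PySem.Set.ofList (g.map (fun i => labels.getD i 0))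
      labels.map (fun l => if members.contains l then target else l)) labels0
  ((PySem.Set.ofList labels).length : Int)

-- ===== PRECONDITION & SPEC =====
def Spec_find_min_rooks (board : List (List Int)) (out : Int) : Prop := out = find_min_rooks_alt board
instance (board : List (List Int)) (out : Int) : Decidable (Spec_find_min_rooks board out) := by unfold Spec_find_min_rooks; infer_instance

-- ===== CLAIM (what is proved, stated in full; the proofs are below) =====
def Claim_equal_find_min_rooks : Prop := ∀ (board : List (List Int)), Dom_find_min_rooks board → Spec_find_min_rooks board (find_min_rooks board)

-- ===== LEMMAS AND PROOFS =====

-- iterate of the parent map (one head step at a time, matching pvFindUF's recursion)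
def pvIter (p : List Nat) : Nat → Nat → Nat
  | 0, x => x
  | k+1, x => pvIter p k (p.getD x 0)

def pvFix (p : List Nat) (y : Nat) : Prop := p.getD y 0 = y

-- "s is the root of z in state p": a reachable fixpoint
def pvRS (p : List Nat) (z s : Nat) : Prop := (∃ k, pvIter p k z = s) ∧ pvFix p s

-- valid union-find state over n elements
def pvInv (n : Nat) (p : List Nat) : Prop :=
  p.length = n ∧ (∀ x, x < n → p.getD x 0 < n) ∧ (∀ x, x < n → ∃ k, pvFix p (pvIter p k x))

theorem pvIter_add (p : List Nat) (k m x : Nat) :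
    pvIter p (k + m) x = pvIter p m (pvIter p k x) := by
  induction k generalizing x with
  | zero => simp [pvIter]
  | succ k ih =>
    have h : k + 1 + m = (k + m) + 1 := by omega
    rw [h]
    show pvIter p (k + m) (p.getD x 0) = _
    rw [ih]
    rfl

theorem pvIter_fix (p : List Nat) (y : Nat) (h : pvFix p y) (k : Nat) : pvIter p k y = y := by
  induction k with
  | zero => rfl
  | succ k ih => show pvIter p k (p.getD y 0) = y; rw [h]; exact ih

theorem pvRS_unique (p : List Nat) (z s t : Nat) (hs : pvRS p z s) (ht : pvRS p z t) : s = t := by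
  obtain ⟨⟨k, hk⟩, hfs⟩ := hs
  obtain ⟨⟨m, hm⟩, hft⟩ := ht
  rcases Nat.le_total k m with h | h
  · have e : pvIter p m z = pvIter p (m - k) (pvIter p k z) := by
      rw [← pvIter_add]; congr 1; omega
    rw [hk, pvIter_fix p s hfs] at e
    rw [← hm, e]
  · have e : pvIter p k z = pvIter p (k - m) (pvIter p m z) := by
      rw [← pvIter_add]; congr 1; omega
    rw [hm, pvIter_fix p t hft] at e
    rw [← hk, e]

theorem pvRS_step (p : List Nat) (z s : Nat) (h : pvRS p (p.getD z 0) s) : pvRS p z s := by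
  obtain ⟨⟨k, hk⟩, hf⟩ := h
  exact ⟨⟨k + 1, by simpa [pvIter] using hk⟩, hf⟩

theorem pvIter_lt (n : Nat) (p : List Nat) (hInv : pvInv n p) (x : Nat) (hx : x < n) (k : Nat) :
    pvIter p k x < n := by
  induction k generalizing x with
  | zero => exact hx
  | succ k ih => exact ih _ (hInv.2.1 x hx)

theorem pvFindPeriod (p : List Nat) (x i j : Nat) (hij : i < j)
    (heq : pvIter p i x = pvIter p j x) (K : Nat) (hK : j ≤ K)
    (hKfix : pvFix p (pvIter p K x)) :
    pvFix p (pvIter p (K - (j - i)) x) := by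
  have key : pvIter p (K - (j - i)) x = pvIter p K x := by
    have h1 : pvIter p (K - (j - i)) x = pvIter p (K - j) (pvIter p i x) := by
      rw [← pvIter_add]; congr 1; omega
    have h2 : pvIter p K x = pvIter p (K - j) (pvIter p j x) := by
      rw [← pvIter_add]; congr 1; omega
    rw [h1, heq, ← h2]
  rw [key]; exact hKfix

-- the pigeonhole bound: in a valid state every chain stabilises within n steps
theorem pvRoot_fix (n : Nat) (p : List Nat) (hInv : pvInv n p) (x : Nat) (hx : x < n) :
    pvFix p (pvIter p n x) := by
  have hex : ∃ k, pvFix p (pvIter p k x) := hInv.2.2 x hx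
  classical
  have hKfix : pvFix p (pvIter p (Nat.find hex) x) := Nat.find_spec hex
  have hKle : Nat.find hex ≤ n := by
    by_contra hgt
    rw [Nat.not_le] at hgt
    have hmaps : ∀ i : Fin (n + 1), pvIter p i x < n := fun i => pvIter_lt n p hInv x hx i
    obtain ⟨i, j, hne, heq⟩ :=
      Fintype.exists_ne_map_eq_of_card_lt
        (fun i : Fin (n + 1) => (⟨pvIter p i x, hmaps i⟩ : Fin n)) (by simp)
    have heq' : pvIter p (i : Nat) x = pvIter p (j : Nat) x := by
      simpa using congrArg Fin.val heq
    have hmain : ∀ a b : Fin (n + 1), (a : Nat) < b →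
        pvIter p (a : Nat) x = pvIter p (b : Nat) x → False := by
      intro a b hab hab'
      have hfix := pvFindPeriod p x a b hab hab' (Nat.find hex) (by omega) hKfix
      have hlt : Nat.find hex - ((b : Nat) - a) < Nat.find hex := by omega
      exact Nat.find_min hex hlt hfix
    rcases Nat.lt_or_ge (i : Nat) (j : Nat) with h | h
    · exact hmain i j h heq'
    · rcases Nat.lt_or_ge (j : Nat) (i : Nat) with h' | h'
      · exact hmain j i h' heq'.symm
      · exact hne (Fin.ext (by omega))
  have e : pvIter p n x = pvIter p (n - Nat.find hex) (pvIter p (Nat.find hex) x) := by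
    rw [← pvIter_add]; congr 1; omega
  rw [e, pvIter_fix p _ hKfix]
  exact hKfix

theorem pvGetD_set (l : List Nat) (i j a : Nat) :
    (l.set i a).getD j 0 = if j = i ∧ i < l.length then a else l.getD j 0 := by
  rcases eq_or_ne j i with rfl | hne
  · by_cases hlt : j < l.length
    · simp [List.getD_eq_getElem?_getD, hlt]
    · have hle : l.length ≤ j := by omega
      simp [List.set_eq_of_length_le hle, hlt]
  · simp [List.getD_eq_getElem?_getD, List.getElem?_set_ne (Ne.symm hne), hne]

-- path compression at x (x already rooted at r) preserves every root
theorem pvRS_set_compress (q : List Nat) (x r : Nat) (hx : x < q.length) (hxr : pvRS q x r) :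
    ∀ z s, pvRS q z s → pvRS (q.set x r) z s := by
  have hfr' : pvFix (q.set x r) r := by
    show (q.set x r).getD r 0 = r
    rw [pvGetD_set]
    rcases eq_or_ne r x with he | hner
    · rw [if_pos ⟨he, hx⟩]
    · rw [if_neg (fun hc => hner hc.1)]
      exact hxr.2
  intro z s hzs
  obtain ⟨⟨k, hk⟩, hfs⟩ := hzs
  induction k generalizing z with
  | zero =>
    have hz : z = s := by simpa [pvIter] using hk
    by_cases hzx : z = x
    · have hs : s = r :=
        pvRS_unique q z s r ⟨⟨0, hz⟩, hfs⟩ (by rw [hzx]; exact hxr)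
      refine ⟨⟨0, hz⟩, ?_⟩
      rw [hs]
      exact hfr'
    · refine ⟨⟨0, hz⟩, ?_⟩
      show (q.set x r).getD s 0 = s
      rw [pvGetD_set, if_neg (fun hc => hzx (by rw [hz, hc.1]))]
      exact hfs
  | succ k ih =>
    have hk' : pvIter q k (q.getD z 0) = s := by simpa [pvIter] using hk
    by_cases hzx : z = x
    · have hs : s = r :=
        pvRS_unique q z s r ⟨⟨k + 1, hk⟩, hfs⟩ (by rw [hzx]; exact hxr)
      rw [hs]
      refine ⟨⟨1, ?_⟩, hfr'⟩
      show pvIter (q.set x r) 0 ((q.set x r).getD z 0) = r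
      rw [pvGetD_set, if_pos ⟨hzx, hx⟩]
      rfl
    · have hrec := ih (q.getD z 0) hk'
      apply pvRS_step
      have he : (q.set x r).getD z 0 = q.getD z 0 := by
        rw [pvGetD_set]; simp [hzx]
      rw [he]; exact hrec

-- redirecting root rb to root ra merges the two classes and nothing else
theorem pvRS_set_union (q : List Nat) (ra rb : Nat) (ha : pvFix q ra) (hb : pvFix q rb)
    (hne : ra ≠ rb) (hlen : rb < q.length) :
    ∀ z s, pvRS q z s → pvRS (q.set rb ra) z (if s = rb then ra else s) := by
  have hra' : pvFix (q.set rb ra) ra := by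
    show (q.set rb ra).getD ra 0 = ra
    rw [pvGetD_set]; simp [hne]
    exact ha
  have hstep_rb : (q.set rb ra).getD rb 0 = ra := by
    rw [pvGetD_set]; simp [hlen]
  have base : ∀ s, pvFix q s → pvRS (q.set rb ra) s (if s = rb then ra else s) := by
    intro s hfs
    by_cases hs : s = rb
    · subst hs
      simp only [if_pos rfl]
      refine ⟨⟨1, ?_⟩, hra'⟩
      show pvIter (q.set s ra) 0 ((q.set s ra).getD s 0) = ra
      rw [hstep_rb]
      rfl
    · simp only [if_neg hs]
      refine ⟨⟨0, rfl⟩, ?_⟩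
      show (q.set rb ra).getD s 0 = s
      rw [pvGetD_set]; simp [hs]
      exact hfs
  intro z s hzs
  obtain ⟨⟨k, hk⟩, hfs⟩ := hzs
  induction k generalizing z with
  | zero =>
    have hz : z = s := by simpa [pvIter] using hk
    subst hz
    exact base z hfs
  | succ k ih =>
    by_cases hzf : pvFix q z
    · have hz : z = s := by
        rw [← hk, pvIter_fix q z hzf]
      subst hz
      exact base z hzf
    · have hzrb : z ≠ rb := fun h => hzf (h ▸ hb)
      have hk' : pvIter q k (q.getD z 0) = s := by simpa [pvIter] using hk
      have hrec := ih (q.getD z 0) hk'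
      apply pvRS_step
      have he : (q.set rb ra).getD z 0 = q.getD z 0 := by
        rw [pvGetD_set]; simp [hzrb]
      rw [he]; exact hrec

theorem pvFindUF_spec (n : Nat) : ∀ (fuel : Nat) (p : List Nat) (x : Nat),
    pvInv n p → x < n → (∃ k, k ≤ fuel ∧ pvFix p (pvIter p k x)) →
    pvRS p x (pvFindUF fuel p x).2 ∧
    (pvFindUF fuel p x).1.length = p.length ∧
    (∀ z, z < n → (pvFindUF fuel p x).1.getD z 0 < n) ∧
    (∀ z s, pvRS p z s → pvRS (pvFindUF fuel p x).1 z s) := by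
  intro fuel
  induction fuel with
  | zero =>
    intro p x hInv hx hk
    obtain ⟨k, hk0, hfix⟩ := hk
    have hk0' : k = 0 := by omega
    subst hk0'
    have hfx : pvFix p x := by simpa [pvIter] using hfix
    exact ⟨⟨⟨0, rfl⟩, hfx⟩, rfl, fun z hz => hInv.2.1 z hz, fun z s h => h⟩
  | succ fuel ih =>
    intro p x hInv hx hk
    by_cases hpx : p.getD x 0 = x
    · have hres : pvFindUF (fuel + 1) p x = (p, x) := by
        show (if p.getD x 0 = x then (p, x)
          else ((pvFindUF fuel p (p.getD x 0)).1.set x (pvFindUF fuel p (p.getD x 0)).2,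
            (pvFindUF fuel p (p.getD x 0)).2)) = (p, x)
        rw [if_pos hpx]
      rw [hres]
      exact ⟨⟨⟨0, rfl⟩, hpx⟩, rfl, fun z hz => hInv.2.1 z hz, fun z s h => h⟩
    · obtain ⟨k, hkle, hfix⟩ := hk
      have hkpos : k ≠ 0 := by
        rintro rfl
        exact hpx (by simpa [pvIter] using hfix)
      obtain ⟨k', rfl⟩ : ∃ k', k = k' + 1 := ⟨k - 1, by omega⟩
      have hfix' : pvFix p (pvIter p k' (p.getD x 0)) := by simpa [pvIter] using hfix
      have hpxlt : p.getD x 0 < n := hInv.2.1 x hx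
      obtain ⟨hRS, hlen, hcl, hpres⟩ := ih p (p.getD x 0) hInv hpxlt ⟨k', by omega, hfix'⟩
      set q := (pvFindUF fuel p (p.getD x 0)).1 with hq
      set r := (pvFindUF fuel p (p.getD x 0)).2 with hr
      have hRSx : pvRS p x r := pvRS_step p x r hRS
      have hRSqx : pvRS q x r := hpres x r hRSx
      have hxq : x < q.length := by rw [hlen, hInv.1]; exact hx
      have hrn : r < n := by
        obtain ⟨⟨m, hm⟩, _⟩ := hRSx
        rw [← hm]
        exact pvIter_lt n p hInv x hx m
      have hres : pvFindUF (fuel + 1) p x = (q.set x r, r) := by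
        show (if p.getD x 0 = x then (p, x)
          else ((pvFindUF fuel p (p.getD x 0)).1.set x (pvFindUF fuel p (p.getD x 0)).2,
            (pvFindUF fuel p (p.getD x 0)).2)) = (q.set x r, r)
        rw [if_neg hpx]
      rw [hres]
      refine ⟨hRSx, ?_, ?_, ?_⟩
      · simp [hlen]
      · intro z hz
        rw [pvGetD_set]
        split_ifs with h
        · exact hrn
        · exact hcl z hz
      · intro z s hzs
        exact pvRS_set_compress q x r hxq hRSqx z s (hpres z s hzs)

theorem pvInv_of_pres (n : Nat) (p p' : List Nat) (hInv : pvInv n p) (hlen : p'.length = n)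
    (hcl : ∀ z, z < n → p'.getD z 0 < n) (hpres : ∀ z s, pvRS p z s → pvRS p' z s) :
    pvInv n p' := by
  refine ⟨hlen, hcl, fun z hz => ?_⟩
  obtain ⟨k, hk⟩ := hInv.2.2 z hz
  obtain ⟨⟨m, hm⟩, hf⟩ := hpres z _ ⟨⟨k, rfl⟩, hk⟩
  exact ⟨m, by rw [hm]; exact hf⟩

theorem pvInv_mk (n : Nat) (p' : List Nat) (hlen : p'.length = n)
    (hcl : ∀ z, z < n → p'.getD z 0 < n) (h : ∀ z, z < n → ∃ s, pvRS p' z s) :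
    pvInv n p' := by
  refine ⟨hlen, hcl, fun z hz => ?_⟩
  obtain ⟨s, ⟨k, hk⟩, hf⟩ := h z hz
  exact ⟨k, by rw [hk]; exact hf⟩

theorem pvUnionUF_spec (n : Nat) (p : List Nat) (a b : Nat) (hInv : pvInv n p)
    (ha : a < n) (hb : b < n) :
    (pvUnionUF p a b).length = n ∧
    (∀ z, z < n → (pvUnionUF p a b).getD z 0 < n) ∧
    (∀ z s sa sb, pvRS p z s → pvRS p a sa → pvRS p b sb →
      pvRS (pvUnionUF p a b) z (if s = sb then sa else s)) := by
  have hlenp : p.length = n := hInv.1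
  obtain ⟨hRSa, hlen1, hcl1, hpres1⟩ :=
    pvFindUF_spec n p.length p a hInv ha ⟨n, by omega, pvRoot_fix n p hInv a ha⟩
  set p1 := (pvFindUF p.length p a).1 with hp1
  set ra := (pvFindUF p.length p a).2 with hra
  have hInv1 : pvInv n p1 := pvInv_of_pres n p p1 hInv (by rw [hlen1, hlenp]) hcl1 hpres1
  obtain ⟨hRSb, hlen2, hcl2, hpres2⟩ :=
    pvFindUF_spec n p1.length p1 b hInv1 hb ⟨n, by rw [hInv1.1], pvRoot_fix n p1 hInv1 b hb⟩
  set p2 := (pvFindUF p1.length p1 b).1 with hp2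
  set rb := (pvFindUF p1.length p1 b).2 with hrb
  have hInv2 : pvInv n p2 := pvInv_of_pres n p1 p2 hInv1 (by rw [hlen2, hInv1.1]) hcl2 hpres2
  have hdef : pvUnionUF p a b = if ra ≠ rb then p2.set rb ra else p2 := rfl
  have hRSa2 : pvRS p2 a ra := hpres2 a ra (hpres1 a ra hRSa)
  have hRSb2 : pvRS p2 b rb := hpres2 b rb hRSb
  have hrbn : rb < n := by
    obtain ⟨⟨m, hm⟩, _⟩ := hRSb
    rw [← hm]
    exact pvIter_lt n p1 hInv1 b hb m
  have hran : ra < n := by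
    obtain ⟨⟨m, hm⟩, _⟩ := hRSa
    rw [← hm]
    exact pvIter_lt n p hInv a ha m
  by_cases hc : ra = rb
  · rw [hdef, if_neg (by simpa using hc)]
    refine ⟨by rw [hInv2.1], hInv2.2.1, ?_⟩
    intro z s sa sb hzs hsa hsb
    have hsa' : sa = ra := pvRS_unique p a sa ra hsa hRSa
    have hsb' : sb = rb := pvRS_unique p1 b sb rb (hpres1 b sb hsb) hRSb
    subst hsa' hsb'
    have hz2 : pvRS p2 z s := hpres2 z s (hpres1 z s hzs)
    rcases eq_or_ne s rb with rfl | hsne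
    · simpa [hc] using hz2
    · simpa [hsne] using hz2
  · rw [hdef, if_pos (by simpa using hc)]
    have hfa : pvFix p2 ra := hRSa2.2
    have hfb : pvFix p2 rb := hRSb2.2
    have hlenrb : rb < p2.length := by rw [hInv2.1]; exact hrbn
    refine ⟨by simp [hInv2.1], ?_, ?_⟩
    · intro z hz
      rw [pvGetD_set]
      split_ifs with h
      · exact hran
      · exact hInv2.2.1 z hz
    · intro z s sa sb hzs hsa hsb
      have hsa' : sa = ra := pvRS_unique p a sa ra hsa hRSa
      have hsb' : sb = rb := pvRS_unique p1 b sb rb (hpres1 b sb hsb) hRSb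
      subst hsa' hsb'
      exact pvRS_set_union p2 ra rb hfa hfb hc hlenrb z s (hpres2 z s (hpres1 z s hzs))

-- abstract label transformer of a single union(first, o)
def pvU (first : Nat) (f : Nat → Nat) (o : Nat) : Nat → Nat :=
  fun z => if f z = f o then f first else f z

-- abstract label transformer of a whole group, in one pass
def pvMrg (f : Nat → Nat) (g : List Nat) : Nat → Nat :=
  fun z => if f z ∈ g.map f then f (g.headD 0) else f z

theorem pvGroupFoldA (n first : Nat) (hfirst : first < n) :
    ∀ (os : List Nat) (p : List Nat) (f : Nat → Nat),
      pvInv n p → (∀ o ∈ os, o < n) → (∀ z, z < n → pvRS p z (f z)) →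
      pvInv n (os.foldl (fun p o => pvUnionUF p first o) p) ∧
      ∀ z, z < n → pvRS (os.foldl (fun p o => pvUnionUF p first o) p) z
            ((os.foldl (pvU first) f) z) := by
  intro os
  induction os with
  | nil =>
    intro p f hInv _ hf
    exact ⟨hInv, by simpa using hf⟩
  | cons o os ih =>
    intro p f hInv ho hf
    have hon : o < n := ho o (by simp)
    obtain ⟨hlen, hcl, hmap⟩ := pvUnionUF_spec n p first o hInv hfirst hon
    have hf' : ∀ z, z < n → pvRS (pvUnionUF p first o) z (pvU first f o z) := by
      intro z hz
      exact hmap z (f z) (f first) (f o) (hf z hz) (hf first hfirst) (hf o hon)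
    have hInv' : pvInv n (pvUnionUF p first o) :=
      pvInv_mk n _ hlen hcl (fun z hz => ⟨pvU first f o z, hf' z hz⟩)
    simpa using ih (pvUnionUF p first o) (pvU first f o) hInv'
      (fun o' ho' => ho o' (List.mem_cons_of_mem _ ho')) hf'

theorem pvU_fold_eq_mrg (first : Nat) (f : Nat → Nat) :
    ∀ (os done : List Nat) (fd : Nat → Nat),
      (∀ z, fd z = if f z ∈ ((first :: done).map f) then f first else f z) →
      ∀ z, (os.foldl (pvU first) fd) z
            = if f z ∈ ((first :: (done ++ os)).map f) then f first else f z := by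
  intro os
  induction os with
  | nil =>
    intro done fd h z
    simpa using h z
  | cons o os ih =>
    intro done fd h z
    have hfirstfd : fd first = f first := by
      rw [h first]; simp
    have hassoc : done ++ o :: os = (done ++ [o]) ++ os := by simp
    rw [hassoc]
    have hmem : ∀ w, (f w ∈ ((first :: (done ++ [o])).map f)
        ↔ (f w ∈ ((first :: done).map f) ∨ f w = f o)) := by
      intro w
      simp only [List.map_cons, List.map_append, List.mem_cons, List.mem_append,
        List.map_nil, List.mem_singleton]
      tauto
    by_cases hSo : f o ∈ ((first :: done).map f)
    · have hfdo : fd o = f first := by rw [h o, if_pos hSo]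
      have hstep : pvU first fd o = fd := by
        funext w
        unfold pvU
        rw [hfdo, hfirstfd]
        split_ifs with hc
        · exact hc.symm
        · rfl
      have h' : ∀ w, fd w = if f w ∈ ((first :: (done ++ [o])).map f) then f first else f w := by
        intro w
        rw [h w]
        by_cases hw : f w ∈ ((first :: done).map f)
        · rw [if_pos hw, if_pos ((hmem w).mpr (Or.inl hw))]
        · rw [if_neg hw, if_neg]
          rw [hmem w]
          rintro (hc | hc)
          · exact hw hc
          · exact hw (hc ▸ hSo)
      show (os.foldl (pvU first) (pvU first fd o)) z = _
      rw [hstep]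
      exact ih (done ++ [o]) fd h' z
    · have hfdo : fd o = f o := by rw [h o, if_neg hSo]
      have hfirstS : f first ∈ ((first :: done).map f) := by simp
      have hnefo : f first ≠ f o := fun e => hSo (e ▸ hfirstS)
      have h' : ∀ w, pvU first fd o w
          = if f w ∈ ((first :: (done ++ [o])).map f) then f first else f w := by
        intro w
        unfold pvU
        rw [hfdo, hfirstfd, h w]
        by_cases hw : f w ∈ ((first :: done).map f)
        · rw [if_pos hw, if_neg hnefo, if_pos ((hmem w).mpr (Or.inl hw))]
        · rw [if_neg hw]
          by_cases hwo : f w = f o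
          · rw [if_pos hwo, if_pos ((hmem w).mpr (Or.inr hwo))]
          · rw [if_neg hwo, if_neg]
            rw [hmem w]
            rintro (hc | hc)
            · exact hw hc
            · exact hwo hc
      show (os.foldl (pvU first) (pvU first fd o)) z = _
      rw [funext h']
      exact ih (done ++ [o]) _ (fun w => rfl) z

theorem pvMrg_eq_foldU (f : Nat → Nat) (g : List Nat) (hne : g ≠ []) :
    ∀ z, ((g.drop 1).foldl (pvU (g.headD 0)) f) z = pvMrg f g z := by
  obtain ⟨first, rest, rfl⟩ := List.exists_cons_of_ne_nil hne
  intro z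
  have h0 : ∀ z, f z = if f z ∈ (first :: ([] : List Nat)).map f then f first else f z := by
    intro z
    by_cases h : f z ∈ ([first] : List Nat).map f
    · simp only [List.map_cons, List.map_nil, List.mem_cons, List.not_mem_nil, or_false] at h
      simp [h]
    · simp [h]
  simpa [pvMrg] using pvU_fold_eq_mrg first f rest [] f h0 z

def pvKer (n : Nat) (fA fB : Nat → Nat) : Prop :=
  ∀ i j, i < n → j < n → (fA i = fA j ↔ fB i = fB j)

theorem pvKer_mrg (n : Nat) (fA fB : Nat → Nat) (g : List Nat)
    (hg : ∀ i ∈ g, i < n) (hne : g ≠ []) (hker : pvKer n fA fB) :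
    pvKer n (pvMrg fA g) (pvMrg fB g) := by
  have hfirstmem : g.headD 0 ∈ g := by
    obtain ⟨a, t, rfl⟩ := List.exists_cons_of_ne_nil hne
    simp
  have memb : ∀ z, z < n → (fA z ∈ g.map fA ↔ fB z ∈ g.map fB) := by
    intro z hz
    simp only [List.mem_map]
    constructor
    · rintro ⟨m, hm, he⟩
      exact ⟨m, hm, (hker m z (hg m hm) hz).mp he⟩
    · rintro ⟨m, hm, he⟩
      exact ⟨m, hm, (hker m z (hg m hm) hz).mpr he⟩
  intro i j hi hj
  unfold pvMrg
  by_cases hAi : fA i ∈ g.map fA <;> by_cases hAj : fA j ∈ g.map fA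
  · rw [if_pos hAi, if_pos hAj, if_pos ((memb i hi).mp hAi), if_pos ((memb j hj).mp hAj)]
    exact iff_of_true rfl rfl
  · have hBj : fB j ∉ g.map fB := fun h => hAj ((memb j hj).mpr h)
    rw [if_pos hAi, if_neg hAj, if_pos ((memb i hi).mp hAi), if_neg hBj]
    constructor
    · intro he
      exact absurd (he ▸ List.mem_map_of_mem hfirstmem) hAj
    · intro he
      exact absurd (he ▸ List.mem_map_of_mem hfirstmem) hBj
  · have hBi : fB i ∉ g.map fB := fun h => hAi ((memb i hi).mpr h)
    rw [if_neg hAi, if_pos hAj, if_neg hBi, if_pos ((memb j hj).mp hAj)]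
    constructor
    · intro he
      exact absurd (he ▸ List.mem_map_of_mem hfirstmem) hAi
    · intro he
      exact absurd (he ▸ List.mem_map_of_mem hfirstmem) hBi
  · have hBi : fB i ∉ g.map fB := fun h => hAi ((memb i hi).mpr h)
    have hBj : fB j ∉ g.map fB := fun h => hAj ((memb j hj).mpr h)
    rw [if_neg hAi, if_neg hAj, if_neg hBi, if_neg hBj]
    exact hker i j hi hj

theorem pvKer_congr (n : Nat) (fA fA' fB fB' : Nat → Nat)
    (hA : ∀ i, i < n → fA i = fA' i) (hB : ∀ i, i < n → fB i = fB' i)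
    (hker : pvKer n fA fB) : pvKer n fA' fB' := by
  intro i j hi hj
  rw [← hA i hi, ← hA j hj, ← hB i hi, ← hB j hj]
  exact hker i j hi hj

theorem pvGetD_map_lt (l : List Nat) (φ : Nat → Nat) (i : Nat) (h : i < l.length) :
    (l.map φ).getD i 0 = φ (l.getD i 0) := by
  simp [List.getD_eq_getElem?_getD, List.getElem?_eq_getElem, h]

theorem pvLabelStep (labels g : List Nat) (i : Nat) (hi : i < labels.length) :
    (labels.map (fun l => if (PySem.Set.ofList (g.map (fun i => labels.getD i 0))).contains l
        then labels.getD (g.headD 0) 0 else l)).getD i 0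
      = pvMrg (fun i => labels.getD i 0) g i := by
  rw [pvGetD_map_lt _ _ i hi]
  unfold pvMrg
  by_cases hc : labels.getD i 0 ∈ g.map (fun j => labels.getD j 0)
  · rw [if_pos hc, if_pos]
    simpa [PySem.Set.mem_ofList] using hc
  · rw [if_neg hc, if_neg]
    simpa [PySem.Set.mem_ofList] using hc

theorem pvGroupsFold (n : Nat) :
    ∀ (gs : List (List Nat)) (p labels : List Nat) (F : Nat → Nat),
      pvInv n p → labels.length = n →
      (∀ g ∈ gs, g ≠ [] ∧ ∀ i ∈ g, i < n) →
      (∀ z, z < n → pvRS p z (F z)) →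
      pvKer n F (fun i => labels.getD i 0) →
      pvInv n (gs.foldl (fun p g => (g.drop 1).foldl (fun p o => pvUnionUF p (g.headD 0) o) p) p) ∧
      (gs.foldl (fun labels g =>
          labels.map (fun l => if (PySem.Set.ofList (g.map (fun i => labels.getD i 0))).contains l
            then labels.getD (g.headD 0) 0 else l)) labels).length = n ∧
      ∃ F' : Nat → Nat,
        (∀ z, z < n →
          pvRS (gs.foldl (fun p g => (g.drop 1).foldl (fun p o => pvUnionUF p (g.headD 0) o) p) p) z (F' z)) ∧
        pvKer n F' (fun i =>
          (gs.foldl (fun labels g =>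
            labels.map (fun l => if (PySem.Set.ofList (g.map (fun i => labels.getD i 0))).contains l
              then labels.getD (g.headD 0) 0 else l)) labels).getD i 0) := by
  intro gs
  induction gs with
  | nil =>
    intro p labels F hInv hlen _ hF hker
    exact ⟨hInv, hlen, F, hF, hker⟩
  | cons g gs ih =>
    intro p labels F hInv hlen hgs hF hker
    obtain ⟨hgne, hgm⟩ := hgs g (by simp)
    have hfirstmem : g.headD 0 ∈ g := by
      obtain ⟨a, t, rfl⟩ := List.exists_cons_of_ne_nil hgne
      simp
    have hfirst : g.headD 0 < n := hgm _ hfirstmem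
    obtain ⟨hInv', hRS'⟩ := pvGroupFoldA n (g.headD 0) hfirst (g.drop 1) p F hInv
      (fun o ho => hgm o (List.mem_of_mem_drop ho)) hF
    have hRSmrg : ∀ z, z < n →
        pvRS ((g.drop 1).foldl (fun p o => pvUnionUF p (g.headD 0) o) p) z (pvMrg F g z) := by
      intro z hz
      have h1 := hRS' z hz
      rwa [pvMrg_eq_foldU F g hgne z] at h1
    have hlen' : (labels.map (fun l =>
        if (PySem.Set.ofList (g.map (fun i => labels.getD i 0))).contains l
        then labels.getD (g.headD 0) 0 else l)).length = n := by
      simp [hlen]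
    have hB : ∀ i, i < n → (labels.map (fun l =>
        if (PySem.Set.ofList (g.map (fun i => labels.getD i 0))).contains l
        then labels.getD (g.headD 0) 0 else l)).getD i 0
          = pvMrg (fun i => labels.getD i 0) g i := by
      intro i hi
      exact pvLabelStep labels g i (by omega)
    have hker' : pvKer n (pvMrg F g) (fun i => (labels.map (fun l =>
        if (PySem.Set.ofList (g.map (fun i => labels.getD i 0))).contains l
        then labels.getD (g.headD 0) 0 else l)).getD i 0) :=
      pvKer_congr n (pvMrg F g) (pvMrg F g) (pvMrg (fun i => labels.getD i 0) g) _
        (fun _ _ => rfl) (fun i hi => (hB i hi).symm)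
        (pvKer_mrg n F (fun i => labels.getD i 0) g hgm hgne hker)
    simpa using ih ((g.drop 1).foldl (fun p o => pvUnionUF p (g.headD 0) o) p)
      (labels.map (fun l => if (PySem.Set.ofList (g.map (fun i => labels.getD i 0))).contains l
        then labels.getD (g.headD 0) 0 else l))
      (pvMrg F g) hInv' hlen' (fun g' hg' => hgs g' (List.mem_cons_of_mem _ hg')) hRSmrg hker'

theorem pvCount (n : Nat) (fA fB : Nat → Nat) (hker : pvKer n fA fB) :
    (PySem.Set.ofList ((List.range n).map fA)).length
      = (PySem.Set.ofList ((List.range n).map fB)).length := by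
  induction n with
  | zero => simp
  | succ n ih =>
    have hker' : pvKer n fA fB := fun i j hi hj => hker i j (by omega) (by omega)
    have hmemn : (fA n ∈ (List.range n).map fA) ↔ (fB n ∈ (List.range n).map fB) := by
      simp only [List.mem_map, List.mem_range]
      constructor
      · rintro ⟨i, hi, he⟩
        exact ⟨i, hi, (hker i n (by omega) (by omega)).mp he⟩
      · rintro ⟨i, hi, he⟩
        exact ⟨i, hi, (hker i n (by omega) (by omega)).mpr he⟩
    rw [List.range_succ, List.map_append, List.map_append]
    simp only [List.map_cons, List.map_nil]
    rw [PySem.Set.ofList_append_singleton, PySem.Set.ofList_append_singleton]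
    by_cases hA : fA n ∈ (List.range n).map fA
    · rw [PySem.Set.add_of_mem (by rw [PySem.Set.mem_ofList]; exact hA),
        PySem.Set.add_of_mem (by rw [PySem.Set.mem_ofList]; exact hmemn.mp hA)]
      exact ih hker'
    · rw [PySem.Set.add_of_not_mem (by rw [PySem.Set.mem_ofList]; exact hA),
        PySem.Set.add_of_not_mem (by rw [PySem.Set.mem_ofList]; exact fun h => hA (hmemn.mpr h))]
      simp [ih hker']

theorem pvFinalA (n : Nat) :
    ∀ (xs : List Nat) (p : List Nat) (s0 : PySem.Set Nat) (F : Nat → Nat),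
      pvInv n p → (∀ x ∈ xs, x < n) → (∀ z, z < n → pvRS p z (F z)) →
      (xs.foldl (fun ps i => let fr := pvFindUF ps.1.length ps.1 i;
          (fr.1, PySem.Set.add ps.2 fr.2)) (p, s0)).2
        = (xs.map F).foldl PySem.Set.add s0 := by
  intro xs
  induction xs with
  | nil =>
    intro p s0 F _ _ _
    rfl
  | cons i xs ih =>
    intro p s0 F hInv hxs hF
    have hi : i < n := hxs i (by simp)
    obtain ⟨hRS, hlen, hcl, hpres⟩ := pvFindUF_spec n p.length p i hInv hi
      ⟨n, by rw [hInv.1], pvRoot_fix n p hInv i hi⟩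
    have hInv' : pvInv n (pvFindUF p.length p i).1 :=
      pvInv_of_pres n p _ hInv (by rw [hlen, hInv.1]) hcl hpres
    have hr : (pvFindUF p.length p i).2 = F i := pvRS_unique p i _ _ hRS (hF i hi)
    simp only [List.foldl_cons, List.map_cons]
    rw [← hr]
    exact ih (pvFindUF p.length p i).1 (PySem.Set.add s0 (pvFindUF p.length p i).2) F hInv'
      (fun x hx => hxs x (List.mem_cons_of_mem _ hx)) (fun z hz => hpres z (F z) (hF z hz))

theorem pvSelfMap (l : List Nat) : (List.range l.length).map (fun i => l.getD i 0) = l := by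
  apply List.ext_getElem
  · simp
  · intro i h1 h2
    simp [List.getD_eq_getElem?_getD, List.getElem?_eq_getElem, h2]

theorem pvDictFacts (n : Nat) (l : List (Int × Nat)) (hl : ∀ q ∈ l, q.2 < n) :
    ∀ g ∈ (l.foldl (fun d q => d.modify q.1 [] (· ++ [q.2])) (PySem.Dict.empty)).values,
      g ≠ [] ∧ ∀ i ∈ g, i < n := by
  intro g hg
  set d := l.foldl (fun d q => d.modify q.1 [] (· ++ [q.2])) PySem.Dict.empty with hd
  have hnodup : d.keys.Nodup := by
    rw [hd]
    exact PySem.Dict.nodup_keys_foldl_modify_key l (fun q => q.1) [] (fun d q => (· ++ [q.2]))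
      PySem.Dict.empty (by simp)
  have hvals : d.values = d.keys.map (fun k => d.getD k []) :=
    PySem.Dict.values_eq_map_keys d hnodup []
  rw [hvals] at hg
  obtain ⟨k, hk, rfl⟩ := List.mem_map.mp hg
  have hkeys : d.keys = PySem.Set.ofList (l.map (fun q => q.1)) := by
    rw [hd]
    have h1 := PySem.Dict.keys_foldl_modify_key (l := l) (key := fun q => q.1) (d0 := ([] : List Nat))
      (f := fun d q => (· ++ [q.2])) (d := PySem.Dict.empty)
    simpa [PySem.Set.update_nil_left] using h1
  have hgetd : d.getD k [] = (l.filter (fun q => q.1 == k)).map (fun q => q.2) := by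
    rw [hd]
    have h1 := PySem.Dict.getD_foldl_modify_append (l := l) (d := PySem.Dict.empty) (c := k)
    simpa using h1
  have hkmem : k ∈ l.map (fun q => q.1) := by
    rw [hkeys] at hk
    rwa [PySem.Set.mem_ofList] at hk
  obtain ⟨q, hq, rfl⟩ := List.mem_map.mp hkmem
  constructor
  · rw [hgetd]
    intro hemp
    have hqf : q ∈ l.filter (fun q' => q'.1 == q.1) := by
      rw [List.mem_filter]
      exact ⟨hq, by simp⟩
    rw [List.map_eq_nil_iff] at hemp
    rw [hemp] at hqf
    simp at hqf
  · intro i hi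
    rw [hgetd] at hi
    obtain ⟨q', hq', rfl⟩ := List.mem_map.mp hi
    exact hl q' (List.mem_of_mem_filter hq')

theorem pvZipIdxSndLt (pos : List (Int × Int)) :
    ∀ q ∈ pos.zipIdx.map (fun p => (p.1.1, p.2)), q.2 < pos.length := by
  intro q hq
  obtain ⟨pr, hpr, rfl⟩ := List.mem_map.mp hq
  obtain ⟨x, i⟩ := pr
  have := List.mem_zipIdx hpr
  omega

theorem pvZipIdxSndLt2 (pos : List (Int × Int)) :
    ∀ q ∈ pos.zipIdx.map (fun p => (p.1.2, p.2)), q.2 < pos.length := by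
  intro q hq
  obtain ⟨pr, hpr, rfl⟩ := List.mem_map.mp hq
  obtain ⟨x, i⟩ := pr
  have := List.mem_zipIdx hpr
  omega

theorem find_min_rooks_spec : Claim_equal_find_min_rooks := by
  intro board _
  show find_min_rooks board = find_min_rooks_alt board
  by_cases hn : (pvPositions board).length = 0
  · have hnil : pvPositions board = [] := List.length_eq_zero_iff.mp hn
    unfold find_min_rooks find_min_rooks_alt
    rw [hnil]
    rfl
  · set pos := pvPositions board with hposdef
    set n := pos.length with hndef
    have hsplit : pvGroups pos =
        (pos.zipIdx.foldl (fun d p => d.modify p.1.1 [] (· ++ [p.2])) PySem.Dict.empty,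
         pos.zipIdx.foldl (fun d p => d.modify p.1.2 [] (· ++ [p.2])) PySem.Dict.empty) := by
      unfold pvGroups
      rw [PySem.List.foldl_prod_mk
        (f := fun (d : PySem.Dict Int (List Nat)) (p : (Int × Int) × Nat) => d.modify p.1.1 [] (· ++ [p.2]))
        (g := fun (d : PySem.Dict Int (List Nat)) (p : (Int × Int) × Nat) => d.modify p.1.2 [] (· ++ [p.2]))]
    have hrows : (pvGroups pos).1 = ((pos.zipIdx.map (fun p => (p.1.1, p.2))).foldl
        (fun d q => d.modify q.1 [] (· ++ [q.2])) PySem.Dict.empty) := by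
      rw [hsplit, List.foldl_map]
    have hcols : (pvGroups pos).2 = ((pos.zipIdx.map (fun p => (p.1.2, p.2))).foldl
        (fun d q => d.modify q.1 [] (· ++ [q.2])) PySem.Dict.empty) := by
      rw [hsplit, List.foldl_map]
    have hfacts : ∀ g ∈ (pvGroups pos).1.values ++ (pvGroups pos).2.values,
        g ≠ [] ∧ ∀ i ∈ g, i < n := by
      intro g hgm
      rcases List.mem_append.mp hgm with h | h
      · rw [hrows] at h
        exact pvDictFacts n _ (pvZipIdxSndLt pos) g h
      · rw [hcols] at h
        exact pvDictFacts n _ (pvZipIdxSndLt2 pos) g h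
    have hgetd_range : ∀ z, z < n → (List.range n).getD z 0 = z := by
      intro z hz
      simp [List.getD_eq_getElem?_getD, List.getElem?_range, hz]
    have hInv0 : pvInv n (List.range n) :=
      ⟨List.length_range, fun x hx => by rw [hgetd_range x hx]; exact hx,
       fun x hx => ⟨0, by show pvFix _ (pvIter _ 0 x); exact hgetd_range x hx⟩⟩
    have hF0 : ∀ z, z < n → pvRS (List.range n) z z :=
      fun z hz => ⟨⟨0, rfl⟩, hgetd_range z hz⟩
    have hker0 : pvKer n (fun z => z) (fun i => (List.range n).getD i 0) := by
      intro i j hi hj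
      simp only []
      rw [hgetd_range i hi, hgetd_range j hj]
    obtain ⟨hInvF, hlenF, F, hRSF, hkerF⟩ :=
      pvGroupsFold n ((pvGroups pos).1.values ++ (pvGroups pos).2.values)
        (List.range n) (List.range n) (fun z => z) hInv0 List.length_range hfacts hF0 hker0
    rw [List.foldl_append] at hInvF hRSF
    have hA : find_min_rooks board = ((PySem.Set.ofList ((List.range n).map F)).length : Int) := by
      simp only [find_min_rooks]
      rw [← hposdef, ← hndef, if_neg hn]
      rw [pvFinalA n (List.range n)
        ((pvGroups pos).2.values.foldl
          (fun p g => (g.drop 1).foldl (fun p o => pvUnionUF p (g.headD 0) o) p)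
          ((pvGroups pos).1.values.foldl
            (fun p g => (g.drop 1).foldl (fun p o => pvUnionUF p (g.headD 0) o) p)
            (List.range n)))
        PySem.Set.empty F hInvF (fun x hx => List.mem_range.mp hx) hRSF]
      rfl
    have hB : find_min_rooks_alt board
        = ((PySem.Set.ofList ((List.range n).map
            (fun i => (((pvGroups pos).1.values ++ (pvGroups pos).2.values).foldl
              (fun labels g =>
                labels.map (fun l =>
                  if (PySem.Set.ofList (g.map (fun i => labels.getD i 0))).contains l
                  then labels.getD (g.headD 0) 0 else l)) (List.range n)).getD i 0))).length : Int) := by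
      simp only [find_min_rooks_alt]
      rw [← hposdef, ← hndef]
      congr 2
      conv_lhs => rw [← pvSelfMap (((pvGroups pos).1.values ++ (pvGroups pos).2.values).foldl
        (fun labels g =>
          labels.map (fun l =>
            if (PySem.Set.ofList (g.map (fun i => labels.getD i 0))).contains l
            then labels.getD (g.headD 0) 0 else l)) (List.range n))]
      rw [hlenF]
    rw [hA, hB]
    exact_mod_cast pvCount n F _ hkerF
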